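-- pv_equiv track=rewrite | github.com/Avinash531997/Leetcode---DSA | 2373 - Largest Local Values in a Matrix.py | largestLocal
-- ===== SOURCE A (Python) =====
-- from typing import List
--
-- def largestLocal(grid: List[List[int]]) -> List[List[int]]:
--     n=len(grid)-2
--     res=[]
--     for i in range(0,n):
--         row=[]
--         for j in range(0,n):
--             row.append(max(max(grid[i][j:j+3]), max(grid[i+1][j:j+3]), max(grid[i+2][j:j+3])))
--         res.append(row)
--     return res
-- ===== SOURCE B (Python) =====
-- from typing import List
--
-- def largestLocal(grid: List[List[int]]) -> List[List[int]]:
--     n = len(grid) - 2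
--     # separable pass 1: horizontal sliding max of width 3 for every row
--     rowmax = [[max(row[j:j+3]) for j in range(n)] for row in grid]
--     # pass 2: vertical max over three consecutive row-max rows
--     return [[max(rowmax[i][j], rowmax[i+1][j], rowmax[i+2][j]) for j in range(n)]
--             for i in range(n)]
-- ===== Notes on version B (the rewrite author's own statement) =====
-- stated objective: faster
-- what changed: B first materializes a separable rowmax table (horizontal width-3 sliding max per row) and then takes a vertical max over three consecutive rowmax rows, so each row-slice maximum is computed once and reused by three output rows instead of recomputing all three 3-wide slice maxima per cell.
import Mathlib
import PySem

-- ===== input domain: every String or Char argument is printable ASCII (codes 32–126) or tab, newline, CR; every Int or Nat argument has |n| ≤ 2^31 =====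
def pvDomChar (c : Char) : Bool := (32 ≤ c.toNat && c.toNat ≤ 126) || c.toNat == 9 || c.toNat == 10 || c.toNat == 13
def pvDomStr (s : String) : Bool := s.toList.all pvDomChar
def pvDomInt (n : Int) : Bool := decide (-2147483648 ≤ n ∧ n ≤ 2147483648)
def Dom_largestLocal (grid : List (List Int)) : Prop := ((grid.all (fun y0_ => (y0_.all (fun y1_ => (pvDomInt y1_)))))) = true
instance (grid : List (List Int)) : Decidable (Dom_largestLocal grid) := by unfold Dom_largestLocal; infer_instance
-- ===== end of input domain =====

-- B replaces A's per-cell recomputation of three slice maxima by a materialized row-max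
-- table that each output row reuses (a separable two-pass decomposition).

-- Python's max(xs) on a list of ints; Pre_ keeps every slice nonempty, where the default is never read.
def pymax (xs : List Int) : Int := (PySem.List.max? xs (fun y => y)).getD 0

-- ===== PORT A =====
def largestLocal (grid : List (List Int)) : List (List Int) :=
  let n : Int := (grid.length : Int) - 2
  (PySem.List.pyRange 0 n 1).foldl (fun res i =>
    res ++ [(PySem.List.pyRange 0 n 1).foldl (fun row j =>
      row ++ [max (max (pymax (PySem.List.slice (PySem.List.pyGetD grid i []) (some j) (some (j+3))))
                       (pymax (PySem.List.slice (PySem.List.pyGetD grid (i+1) []) (some j) (some (j+3)))))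
                  (pymax (PySem.List.slice (PySem.List.pyGetD grid (i+2) []) (some j) (some (j+3))))]) []]) []

-- ===== PORT B =====
def largestLocal_alt (grid : List (List Int)) : List (List Int) :=
  let n : Int := (grid.length : Int) - 2
  let rowmax : List (List Int) :=
    grid.map (fun row => (PySem.List.pyRange 0 n 1).map (fun j =>
      pymax (PySem.List.slice row (some j) (some (j+3)))))
  (PySem.List.pyRange 0 n 1).map (fun i => (PySem.List.pyRange 0 n 1).map (fun j =>
    max (max (PySem.List.pyGetD (PySem.List.pyGetD rowmax i []) j 0)
             (PySem.List.pyGetD (PySem.List.pyGetD rowmax (i+1) []) j 0))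
        (PySem.List.pyGetD (PySem.List.pyGetD rowmax (i+2) []) j 0)))

-- ===== PRECONDITION & SPEC =====
-- Pre_ excludes exactly the inputs where the Python A raises ValueError (max of an empty
-- slice): more than 2 rows while some row is shorter than len(grid) - 2.
def Pre_largestLocal (grid : List (List Int)) : Prop :=
  (grid.length : Int) - 2 ≤ 0 ∨ ∀ row ∈ grid, (grid.length : Int) - 2 ≤ (row.length : Int)
instance (grid : List (List Int)) : Decidable (Pre_largestLocal grid) := by unfold Pre_largestLocal; infer_instance

def pvWitness_largestLocal : List (List Int) := [[1, 2, 3], [4, 5, 6], [7, 8, 9]]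

def Spec_largestLocal (grid : List (List Int)) (out : List (List Int)) : Prop := out = largestLocal_alt grid
instance (grid : List (List Int)) (out : List (List Int)) : Decidable (Spec_largestLocal grid out) := by unfold Spec_largestLocal; infer_instance

-- ===== CLAIM (what is proved, stated in full; the proofs are below) =====
def Claim_equal_largestLocal : Prop := ∀ (grid : List (List Int)), Dom_largestLocal grid → Pre_largestLocal grid → Spec_largestLocal grid (largestLocal grid)

-- ===== LEMMAS AND PROOFS =====

-- indexing the materialized row-max table equals recomputing the slice max on the source row
lemma rowmax_lookup (grid : List (List Int)) (f : List Int → Int) (i j : Int)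
    (hi0 : 0 ≤ i) (hi : i < (grid.length : Int)) (hj0 : 0 ≤ j)
    (hj : j < (grid.length : Int) - 2) :
    PySem.List.pyGetD (PySem.List.pyGetD
        (grid.map (fun row => (PySem.List.pyRange 0 ((grid.length : Int) - 2) 1).map (fun k => f (PySem.List.slice row (some k) (some (k+3)))))) i []) j 0
      = f (PySem.List.slice (PySem.List.pyGetD grid i []) (some j) (some (j+3))) := by
  rw [PySem.List.pyGetD_eq_getElem _ ([] : List Int) hi0 (by simpa using hi),
      PySem.List.pyGetD_eq_getElem grid ([] : List Int) hi0 hi]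
  simp only [List.getElem_map]
  rw [PySem.List.pyGetD_map_pyRange_of_nonneg _ _ _ _ hj0 hj]

-- ===== VERDICT (by name: the statement is the Claim_ definition above) =====
theorem largestLocal_spec : Claim_equal_largestLocal := by
  intro grid _ _
  unfold Spec_largestLocal largestLocal largestLocal_alt
  rw [PySem.List.foldl_append_singleton_eq_map]
  refine List.map_congr_left ?_
  intro i hi
  rw [PySem.List.foldl_append_singleton_eq_map]
  refine List.map_congr_left ?_
  intro j hj
  have hi' := (PySem.List.mem_pyRange_one).1 hi
  have hj' := (PySem.List.mem_pyRange_one).1 hj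
  rw [rowmax_lookup grid pymax i j (by omega) (by omega) (by omega) (by omega),
      rowmax_lookup grid pymax (i+1) j (by omega) (by omega) (by omega) (by omega),
      rowmax_lookup grid pymax (i+2) j (by omega) (by omega) (by omega) (by omega)]
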